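-- pv_equiv track=rewrite | github.com/kgryczan/excelbi_puzzles | Excel/800-899/885/885 Challenge.py | swap_case_pos
-- ===== SOURCE A (Python) =====
-- def swap_case_pos(s):
--     x = list(s)
--     up = [i for i,c in enumerate(x) if c.isupper()]
--     lo = [i for i,c in enumerate(x) if c.islower()]
--     n = min(len(up), len(lo))
--     for i in range(n):
--         x[up[i]], x[lo[i]] = x[lo[i]], x[up[i]]
--     return "".join(x)
-- ===== SOURCE B (Python) =====
-- def swap_case_pos(s):
--     uppers = [c for c in s if c.isupper()]
--     lowers = [c for c in s if c.islower()]
--     n = min(len(uppers), len(lowers))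
--     out = []
--     cu = cl = 0
--     for c in s:
--         if c.isupper() and cu < n:
--             out.append(lowers[cu])
--             cu += 1
--         elif c.islower() and cl < n:
--             out.append(uppers[cl])
--             cl += 1
--         else:
--             out.append(c)
--     return "".join(out)
-- ===== Notes on version B (the rewrite author's own statement) =====
-- stated objective: alternative
-- what changed: B never builds or pairs position lists and never mutates in place: it extracts only the sequences of uppercase and lowercase characters, then rebuilds the string in one left-to-right pass with two counters, emitting the cu-th lowercase char at each paired uppercase position and the cl-th uppercase char at each paired lowercase position.
import Mathlib
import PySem

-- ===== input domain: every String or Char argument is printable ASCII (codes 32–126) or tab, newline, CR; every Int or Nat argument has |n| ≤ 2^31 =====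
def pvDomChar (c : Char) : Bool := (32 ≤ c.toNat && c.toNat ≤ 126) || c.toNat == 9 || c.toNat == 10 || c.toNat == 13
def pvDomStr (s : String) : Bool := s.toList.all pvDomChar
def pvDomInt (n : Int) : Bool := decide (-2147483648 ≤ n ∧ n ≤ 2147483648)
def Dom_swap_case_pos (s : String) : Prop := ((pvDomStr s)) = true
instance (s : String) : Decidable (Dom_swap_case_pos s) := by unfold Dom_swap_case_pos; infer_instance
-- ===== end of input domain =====

-- B never builds position lists and never mutates in place: it extracts only the uppercase and
-- lowercase character sequences and rebuilds the string in one counting pass; same cost, different shape.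

-- ===== PORT A =====
def swap_case_pos (s : String) : String :=
  let x := s.toList
  let up := ((PySem.List.enumerate x).filter (fun ic => PySem.Chars.isupper ic.2)).map (·.1)
  let lo := ((PySem.List.enumerate x).filter (fun ic => PySem.Chars.islower ic.2)).map (·.1)
  let n := min up.length lo.length
  let x := (PySem.List.pyRange 0 (n : Int) 1).foldl (fun a i =>
      let u := PySem.List.pyGetD up i (0 : Int)
      let l := PySem.List.pyGetD lo i (0 : Int)
      PySem.List.pySetD (PySem.List.pySetD a u (PySem.List.pyGetD a l 'A')) l
        (PySem.List.pyGetD a u 'A')) x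
  String.mk x

-- ===== PORT B =====
def swap_case_pos_alt (s : String) : String :=
  let x := s.toList
  let uppers := x.filter (fun c => PySem.Chars.isupper c)
  let lowers := x.filter (fun c => PySem.Chars.islower c)
  let n := min uppers.length lowers.length
  let st := x.foldl (fun (st : List Char × Nat × Nat) c =>
      if PySem.Chars.isupper c && decide (st.2.1 < n) then
        (st.1 ++ [lowers.getD st.2.1 'A'], st.2.1 + 1, st.2.2)
      else if PySem.Chars.islower c && decide (st.2.2 < n) then
        (st.1 ++ [uppers.getD st.2.2 'A'], st.2.1, st.2.2 + 1)
      else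
        (st.1 ++ [c], st.2.1, st.2.2)) (([] : List Char), 0, 0)
  String.mk st.1

-- ===== PRECONDITION & SPEC =====
def Spec_swap_case_pos (s : String) (out : String) : Prop := out = swap_case_pos_alt s
instance (s : String) (out : String) : Decidable (Spec_swap_case_pos s out) := by unfold Spec_swap_case_pos; infer_instance

-- ===== CLAIM (what is proved, stated in full; the proofs are below) =====
def Claim_equal_swap_case_pos : Prop := ∀ (s : String), Dom_swap_case_pos s → Spec_swap_case_pos s (swap_case_pos s)

-- ===== LEMMAS AND PROOFS =====

-- A's swap loop, as a fold over the list of index pairs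
def pvAfold (ps : List (Int × Int)) (x : List Char) : List Char :=
  ps.foldl (fun a p =>
    PySem.List.pySetD (PySem.List.pySetD a p.1 (PySem.List.pyGetD a p.2 'A')) p.2
      (PySem.List.pyGetD a p.1 'A')) x

-- ghost dict recording, for each swapped pair, the char each position receives (proof device only)
def pvBdict (ps : List (Int × Int)) (x : List Char) (d : PySem.Dict Int Char) : PySem.Dict Int Char :=
  ps.foldl (fun d p =>
    (d.insert p.1 (PySem.List.pyGetD x p.2 'A')).insert p.2 (PySem.List.pyGetD x p.1 'A')) d

def pvIdx (ps : List (Int × Int)) : List Int := ps.flatMap (fun p => [p.1, p.2])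

-- positions of the chars satisfying P, count of them in a prefix, shared spec of the result
def pvPos (x : List Char) (P : Char → Bool) : List Int :=
  ((PySem.List.enumerate x).filter (fun ic => P ic.2)).map (·.1)

def pvCnt (x : List Char) (P : Char → Bool) (j : Nat) : Nat := (x.take j).countP P

def pvN (x : List Char) : Nat :=
  min (x.filter PySem.Chars.isupper).length (x.filter PySem.Chars.islower).length

-- the character the result carries at position j (both programs are proved to produce it)
def pvSpec (x : List Char) (j : Nat) : Char :=
  if PySem.Chars.isupper (x.getD j 'A') && decide (pvCnt x PySem.Chars.isupper j < pvN x) then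
    (x.filter PySem.Chars.islower).getD (pvCnt x PySem.Chars.isupper j) 'A'
  else if PySem.Chars.islower (x.getD j 'A') && decide (pvCnt x PySem.Chars.islower j < pvN x) then
    (x.filter PySem.Chars.isupper).getD (pvCnt x PySem.Chars.islower j) 'A'
  else x.getD j 'A'

-- B's scan, as a structural recursion emitting one char per input char
def pvBrec (U L : List Char) (n : Nat) : List Char → Nat → Nat → List Char
  | [], _, _ => []
  | c :: t, cu, cl =>
    if PySem.Chars.isupper c && decide (cu < n) then L.getD cu 'A' :: pvBrec U L n t (cu + 1) cl
    else if PySem.Chars.islower c && decide (cl < n) then U.getD cl 'A' :: pvBrec U L n t cu (cl + 1)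
    else c :: pvBrec U L n t cu cl

lemma pvIdx_cons (p : Int × Int) (ps : List (Int × Int)) :
    pvIdx (p :: ps) = p.1 :: p.2 :: pvIdx ps := rfl

lemma pv_upper_not_lower (c : Char) (h : PySem.Chars.isupper c = true) :
    PySem.Chars.islower c = false := by
  simp only [PySem.Chars.isupper, Bool.and_eq_true, decide_eq_true_eq] at h
  simp only [PySem.Chars.islower, Bool.and_eq_false_iff, decide_eq_false_iff_not, not_le]
  left
  exact lt_of_le_of_lt h.2 (by decide)

-- range-index loop = zip loop
lemma pv_foldl_range_zip {β : Type} (f : β → Int × Int → β) :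
    ∀ (us ls : List Int) (x : β),
    (List.range (min us.length ls.length)).foldl
      (fun a i => f a (us.getD i 0, ls.getD i 0)) x
    = (us.zip ls).foldl f x := by
  intro us
  induction us with
  | nil => intro ls x; simp
  | cons u us ih =>
    intro ls x
    cases ls with
    | nil => simp
    | cons l ls =>
      have hmin : min (u :: us).length (l :: ls).length = min us.length ls.length + 1 := by
        simp [Nat.succ_min_succ]
      rw [hmin, List.range_succ_eq_map, List.foldl_cons, List.foldl_map, List.zip_cons_cons,
        List.foldl_cons]
      simp only [List.getD_cons_zero, List.getD_cons_succ]
      exact ih ls (f x (u, l))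

lemma pv_mem_idx_zip {us ls : List Int} {e : Int} (h : e ∈ pvIdx (us.zip ls)) :
    e ∈ us ∨ e ∈ ls := by
  simp only [pvIdx, List.mem_flatMap] at h
  obtain ⟨p, hp, he⟩ := h
  have := List.of_mem_zip hp
  simp only [List.mem_cons, List.not_mem_nil, or_false] at he
  rcases he with h1 | h1 <;> subst h1
  · exact Or.inl this.1
  · exact Or.inr this.2

lemma pv_mem_idx_zip_getElem {us ls : List Int} {e : Int} (h : e ∈ pvIdx (us.zip ls)) :
    ∃ (k : Nat) (hk : k < min us.length ls.length),
      us[k]'(by omega) = e ∨ ls[k]'(by omega) = e := by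
  simp only [pvIdx, List.mem_flatMap] at h
  obtain ⟨p, hp, he⟩ := h
  obtain ⟨k, hk, hpk⟩ := List.mem_iff_getElem.mp hp
  rw [List.length_zip] at hk
  refine ⟨k, hk, ?_⟩
  have hz : (us.zip ls)[k]'(by rw [List.length_zip]; omega) =
      (us[k]'(by omega), ls[k]'(by omega)) := List.getElem_zip
  rw [hz] at hpk
  simp only [List.mem_cons, List.not_mem_nil, or_false] at he
  rcases he with h1 | h1 <;> subst h1
  · exact Or.inl (by rw [← hpk])
  · exact Or.inr (by rw [← hpk])

lemma pv_idx_zip_nodup :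
    ∀ (us ls : List Int), us.Nodup → ls.Nodup → (∀ e ∈ us, e ∉ ls) →
    (pvIdx (us.zip ls)).Nodup := by
  intro us
  induction us with
  | nil => intro ls _ _ _; simp [pvIdx]
  | cons u us ih =>
    intro ls hu hl hd
    cases ls with
    | nil => simp [pvIdx]
    | cons l ls =>
      simp only [List.zip_cons_cons, pvIdx_cons]
      have hu' := (List.nodup_cons.mp hu)
      have hl' := (List.nodup_cons.mp hl)
      refine List.nodup_cons.mpr ⟨?_, List.nodup_cons.mpr ⟨?_, ?_⟩⟩
      · intro hmem
        rcases List.mem_cons.mp hmem with h1 | h1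
        · exact hd u (by simp) (by simp [h1])
        · rcases pv_mem_idx_zip h1 with h2 | h2
          · exact hu'.1 h2
          · exact hd u (by simp) (by simp [h2])
      · intro hmem
        rcases pv_mem_idx_zip hmem with h2 | h2
        · exact hd l (by simp [h2]) (by simp)
        · exact hl'.1 h2
      · exact ih ls hu'.2 hl'.2 (fun e he hel => hd e (by simp [he]) (by simp [hel]))

-- untouched indices keep their dict entry
lemma pv_Bdict_get?_of_not_mem :
    ∀ (ps : List (Int × Int)) (x : List Char) (d : PySem.Dict Int Char) (e : Int),
    e ∉ pvIdx ps → (pvBdict ps x d).get? e = d.get? e := by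
  intro ps
  induction ps with
  | nil => intro x d e _; rfl
  | cons p ps ih =>
    intro x d e he
    simp only [pvIdx_cons, List.mem_cons, not_or] at he
    simp only [pvBdict, List.foldl_cons]
    rw [show (List.foldl _ _ ps = pvBdict ps x _) from rfl, ih _ _ _ he.2.2,
      PySem.Dict.get?_insert, PySem.Dict.get?_insert]
    simp [he.1, he.2.1]

-- the entry a pair's first (resp. second) position receives
lemma pv_Bdict_get?_fst :
    ∀ (ps : List (Int × Int)) (x : List Char) (d : PySem.Dict Int Char) (p : Int × Int),
    (pvIdx ps).Nodup → p ∈ ps →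
    (pvBdict ps x d).get? p.1 = some (PySem.List.pyGetD x p.2 'A') := by
  intro ps
  induction ps with
  | nil => intro x d p _ hp; cases hp
  | cons q ps ih =>
    intro x d p hnd hp
    simp only [pvIdx_cons, List.nodup_cons, List.mem_cons, not_or] at hnd
    obtain ⟨⟨h12, h1r⟩, h2r, hndr⟩ := hnd
    simp only [pvBdict, List.foldl_cons]
    rcases List.mem_cons.mp hp with h | h
    · subst h
      rw [show (List.foldl _ _ ps = pvBdict ps x _) from rfl,
        pv_Bdict_get?_of_not_mem ps x _ _ h1r, PySem.Dict.get?_insert, PySem.Dict.get?_insert]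
      simp [h12]
    · exact ih x _ p hndr h

lemma pv_Bdict_get?_snd :
    ∀ (ps : List (Int × Int)) (x : List Char) (d : PySem.Dict Int Char) (p : Int × Int),
    (pvIdx ps).Nodup → p ∈ ps →
    (pvBdict ps x d).get? p.2 = some (PySem.List.pyGetD x p.1 'A') := by
  intro ps
  induction ps with
  | nil => intro x d p _ hp; cases hp
  | cons q ps ih =>
    intro x d p hnd hp
    simp only [pvIdx_cons, List.nodup_cons, List.mem_cons, not_or] at hnd
    obtain ⟨⟨h12, h1r⟩, h2r, hndr⟩ := hnd
    simp only [pvBdict, List.foldl_cons]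
    rcases List.mem_cons.mp hp with h | h
    · subst h
      rw [show (List.foldl _ _ ps = pvBdict ps x _) from rfl,
        pv_Bdict_get?_of_not_mem ps x _ _ h2r, PySem.Dict.get?_insert]
      simp
    · exact ih x _ p hndr h

lemma pv_Bdict_congr :
    ∀ (ps : List (Int × Int)) (x x' : List Char) (d : PySem.Dict Int Char),
    (∀ e ∈ pvIdx ps, PySem.List.pyGetD x e 'A' = PySem.List.pyGetD x' e 'A') →
    pvBdict ps x d = pvBdict ps x' d := by
  intro ps
  induction ps with
  | nil => intro x x' d _; rfl
  | cons p ps ih =>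
    intro x x' d h
    simp only [pvBdict, List.foldl_cons]
    rw [h p.1 (by simp [pvIdx_cons]), h p.2 (by simp [pvIdx_cons])]
    exact ih x x' _ (fun e he => h e (by simp [pvIdx_cons, he]))

lemma pv_main :
    ∀ (ps : List (Int × Int)) (x : List Char) (d : PySem.Dict Int Char),
    (pvIdx ps).Nodup →
    (∀ e ∈ pvIdx ps, ∃ k : Nat, e = (k : Int) ∧ k < x.length) →
    (∀ e ∈ pvIdx ps, d.get? e = none) →
    (∀ k : Nat, k < x.length → d.get? (k : Int) = none ∨ d.get? (k : Int) = some (x.getD k 'A')) →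
    ∀ j : Nat, j < x.length →
    (pvAfold ps x).getD j 'A' = ((pvBdict ps x d).get? (j : Int)).getD (x.getD j 'A') := by
  intro ps
  induction ps with
  | nil =>
    intro x d _ _ _ hag j hj
    simp only [pvAfold, pvBdict, List.foldl_nil]
    rcases hag j hj with h | h <;> simp [h]
  | cons p ps ih =>
    intro x d hnd hbd hnone hag j hj
    obtain ⟨u, l⟩ := p
    simp only [pvIdx_cons, List.nodup_cons, List.mem_cons, not_or] at hnd
    obtain ⟨⟨hul, hur⟩, hlr, hndr⟩ := hnd
    obtain ⟨ku, hku, hkul⟩ := hbd u (by simp [pvIdx_cons])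
    obtain ⟨kl, hkl, hkll⟩ := hbd l (by simp [pvIdx_cons])
    subst hku hkl
    have hkune : ku ≠ kl := fun h => hul (by simp [h])
    set xl := PySem.List.pyGetD x (kl : Int) 'A' with hxl
    set xu := PySem.List.pyGetD x (ku : Int) 'A' with hxu
    set x' := PySem.List.pySetD (PySem.List.pySetD x (ku : Int) xl) (kl : Int) xu with hx'
    set d' := (d.insert (ku : Int) xl).insert (kl : Int) xu with hd'
    have hlen' : x'.length = x.length := by
      simp [hx']
    have hget' : ∀ m : Nat, PySem.List.pyGetD x' (m : Int) 'A' =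
        if m = kl then xu else if m = ku then xl else PySem.List.pyGetD x (m : Int) 'A' := by
      intro m
      rw [hx', PySem.List.pyGetD_pySetD_natCast _ kl m _ _ (by simpa [PySem.List.length_pySetD] using hkll),
        PySem.List.pyGetD_pySetD_natCast _ ku m _ _ hkul]
    have hd'get : ∀ m : Int, d'.get? m =
        if m = (kl : Int) then some xu else if m = (ku : Int) then some xl else d.get? m := by
      intro m
      rw [hd', PySem.Dict.get?_insert, PySem.Dict.get?_insert]
    have hAstep : pvAfold ((((ku : Int), (kl : Int))) :: ps) x = pvAfold ps x' := rfl
    have hBstep : pvBdict ((((ku : Int), (kl : Int))) :: ps) x d = pvBdict ps x d' := rfl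
    have hcongr : pvBdict ps x d' = pvBdict ps x' d' := by
      apply pv_Bdict_congr
      intro e he
      obtain ⟨k, hk1, _⟩ := hbd e (by simp [pvIdx_cons, he])
      subst hk1
      rw [hget']
      have h1 : k ≠ kl := fun h => hlr (h ▸ he)
      have h2 : k ≠ ku := fun h => hur (h ▸ he)
      simp [h1, h2]
    have hbd' : ∀ e ∈ pvIdx ps, ∃ k : Nat, e = (k : Int) ∧ k < x'.length := by
      intro e he; obtain ⟨k, hk1, hk2⟩ := hbd e (by simp [pvIdx_cons, he])
      exact ⟨k, hk1, by omega⟩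
    have hnone' : ∀ e ∈ pvIdx ps, d'.get? e = none := by
      intro e he
      rw [hd'get]
      have h1 : e ≠ (kl : Int) := fun h => hlr (h ▸ he)
      have h2 : e ≠ (ku : Int) := fun h => hur (h ▸ he)
      simp [h1, h2]
      exact hnone e (by simp [pvIdx_cons, he])
    have hag' : ∀ k : Nat, k < x'.length → d'.get? (k : Int) = none ∨
        d'.get? (k : Int) = some (x'.getD k 'A') := by
      intro k hk
      rw [hd'get]
      have hxg : x'.getD k 'A' = PySem.List.pyGetD x' (k : Int) 'A' := by
        simp [PySem.List.pyGetD_natCast]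
      by_cases h1 : k = kl
      · right
        rw [if_pos (by exact_mod_cast congrArg (Nat.cast : Nat → Int) h1), hxg, hget', if_pos h1]
      · have h1' : (k : Int) ≠ (kl : Int) := by exact_mod_cast h1
        by_cases h2 : k = ku
        · right
          rw [if_neg h1', if_pos (by exact_mod_cast congrArg (Nat.cast : Nat → Int) h2), hxg,
            hget', if_neg h1, if_pos h2]
        · have h2' : (k : Int) ≠ (ku : Int) := by exact_mod_cast h2
          rw [if_neg h1', if_neg h2']
          rcases hag k (by omega) with h | h
          · left; exact h
          · right; rw [h, hxg, hget', if_neg h1, if_neg h2]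
            simp [PySem.List.pyGetD_natCast]
    have ihj := ih x' d' hndr hbd' hnone' hag' j (by omega)
    rw [hAstep, hBstep, hcongr]
    rw [ihj]
    by_cases h1 : (j : Int) = (kl : Int)
    · rw [pv_Bdict_get?_of_not_mem ps x' d' _ (h1 ▸ hlr), hd'get, if_pos h1]
      rfl
    · by_cases h2 : (j : Int) = (ku : Int)
      · rw [pv_Bdict_get?_of_not_mem ps x' d' _ (h2 ▸ hur), hd'get, if_neg h1, if_pos h2]
        rfl
      · have h1n : j ≠ kl := fun h => h1 (by exact_mod_cast congrArg (Nat.cast : Nat → Int) h)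
        have h2n : j ≠ ku := fun h => h2 (by exact_mod_cast congrArg (Nat.cast : Nat → Int) h)
        have : x'.getD j 'A' = x.getD j 'A' := by
          have := hget' j
          rw [if_neg h1n, if_neg h2n] at this
          simpa [PySem.List.pyGetD_natCast] using this
        rw [this]

lemma pv_Afold_length :
    ∀ (ps : List (Int × Int)) (x : List Char), (pvAfold ps x).length = x.length := by
  intro ps
  induction ps with
  | nil => intro x; rfl
  | cons p ps ih =>
    intro x
    simp only [pvAfold, List.foldl_cons] at *
    rw [ih]
    simp [PySem.List.length_pySetD]

-- membership / nodup facts about the position lists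
lemma pv_mem_idxList (x : List Char) (P : Char → Bool) (e : Int) (he : e ∈ pvPos x P) :
    ∃ k : Nat, e = (k : Int) ∧ ∃ h : k < x.length, P x[k] = true := by
  simp only [pvPos, List.mem_map, List.mem_filter] at he
  obtain ⟨ic, ⟨hmem, hP⟩, hfst⟩ := he
  rw [PySem.List.mem_enumerate_iff] at hmem
  obtain ⟨k, hk, hic⟩ := hmem
  subst hic
  exact ⟨k, by simpa using hfst.symm, hk, hP⟩

lemma pv_idxList_nodup (x : List Char) (P : Char → Bool) : (pvPos x P).Nodup := by
  have h1 : (PySem.List.enumerate x).Pairwise (fun p q => p.1 < q.1) :=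
    PySem.List.pairwise_lt_enumerate x 0
  have h2 : ((((PySem.List.enumerate x).filter (fun ic => P ic.2))).map (·.1)).Pairwise (· < ·) :=
    List.Pairwise.map (fun (ic : Int × Char) => ic.1) (fun _ _ h => h) (h1.filter (fun ic => P ic.2))
  exact h2.imp (fun h => ne_of_lt h)

lemma pv_disjoint (x : List Char) (e : Int)
    (hu : e ∈ pvPos x PySem.Chars.isupper) :
    e ∉ pvPos x PySem.Chars.islower := by
  intro hl
  obtain ⟨k, hk, hklt, hP⟩ := pv_mem_idxList x _ e hu
  obtain ⟨k', hk', hklt', hQ⟩ := pv_mem_idxList x _ e hl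
  have hkk : k = k' := by
    have : (k : Int) = (k' : Int) := hk ▸ hk'
    exact_mod_cast this
  subst hkk
  have := pv_upper_not_lower _ hP
  rw [this] at hQ
  exact Bool.false_ne_true hQ

-- the (countP of the prefix)-th retained pair of the enumeration is (j, x[j])
lemma pv_fe_getElem (x : List Char) (P : Char → Bool) :
    ∀ (s : Int) (j : Nat) (hj : j < x.length), P (x[j]) = true →
    ((PySem.List.enumerate x s).filter (fun ic => P ic.2))[(x.take j).countP P]? =
      some (s + j, x[j]) := by
  induction x with
  | nil => intro s j hj; simp at hj
  | cons c t ih =>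
    intro s j hj hP
    rw [PySem.List.enumerate_cons]
    cases j with
    | zero =>
      simp only [List.getElem_cons_zero] at hP
      simp [hP]
    | succ k =>
      simp only [List.getElem_cons_succ] at hP ⊢
      have hk : k < t.length := by simpa using hj
      have htake : (c :: t).take (k + 1) = c :: t.take k := rfl
      rw [htake, List.countP_cons]
      by_cases hc : P c = true
      · rw [List.filter_cons_of_pos (p := fun ic : Int × Char => P ic.2) (a := (s, c)) (l := PySem.List.enumerate t (s + 1)) hc,
          if_pos hc, List.getElem?_cons_succ, ih (s + 1) k hk hP]
        congr 2
        push_cast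
        ring
      · rw [List.filter_cons_of_neg (p := fun ic : Int × Char => P ic.2) (a := (s, c)) (l := PySem.List.enumerate t (s + 1)) hc,
          if_neg hc, Nat.add_zero, ih (s + 1) k hk hP]
        congr 2
        push_cast
        ring

lemma pv_filter_eq_map_snd (x : List Char) (P : Char → Bool) :
    x.filter P = ((PySem.List.enumerate x).filter (fun ic => P ic.2)).map (·.2) := by
  have h := PySem.List.map_snd_enumerate x (0 : Int)
  conv_lhs => rw [← h]
  rw [List.filter_map]
  rfl

lemma pv_pos_getElem (x : List Char) (P : Char → Bool) (j : Nat) (hj : j < x.length)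
    (hP : P (x[j]) = true) : (pvPos x P)[pvCnt x P j]? = some ((j : Nat) : Int) := by
  unfold pvPos pvCnt
  rw [List.getElem?_map, pv_fe_getElem x P 0 j hj hP]
  simp

lemma pv_chr_getElem (x : List Char) (P : Char → Bool) (j : Nat) (hj : j < x.length)
    (hP : P (x[j]) = true) : (x.filter P)[pvCnt x P j]? = some (x[j]) := by
  unfold pvCnt
  rw [pv_filter_eq_map_snd, List.getElem?_map, pv_fe_getElem x P 0 j hj hP]
  simp

lemma pv_len_pos (x : List Char) (P : Char → Bool) :
    (pvPos x P).length = (x.filter P).length := by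
  rw [pv_filter_eq_map_snd]
  unfold pvPos
  simp

lemma pv_pair_at (x : List Char) (P : Char → Bool) (k : Nat) (hk : k < (pvPos x P).length) :
    ∃ (j' : Nat) (h : j' < x.length), (pvPos x P)[k]? = some ((j' : Nat) : Int) ∧
      (x.filter P)[k]? = some (x[j']) := by
  have hmem : (pvPos x P)[k] ∈ pvPos x P := List.getElem_mem hk
  obtain ⟨j', hj'cast, hj'lt, hPj⟩ := pv_mem_idxList x P _ hmem
  refine ⟨j', hj'lt, ?_, ?_⟩
  · rw [List.getElem?_eq_getElem hk, hj'cast]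
  · -- k is the index of j' in the filtered list: both lists come from the same filtered enumeration
    have h1 := pv_pos_getElem x P j' hj'lt hPj
    have h2 := pv_chr_getElem x P j' hj'lt hPj
    have hkcnt : k = pvCnt x P j' := by
      have hnd := pv_idxList_nodup x P
      have hlt : pvCnt x P j' < (pvPos x P).length := (List.getElem?_eq_some_iff.mp h1).1
      have : (pvPos x P)[k] = (pvPos x P)[pvCnt x P j'] := by
        rw [hj'cast, (List.getElem?_eq_some_iff.mp h1).2]
      exact (List.Nodup.getElem_inj_iff hnd).mp this
    rw [hkcnt]
    exact h2

-- A's result, elementwise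
lemma pv_A_elem (x : List Char) (j : Nat) (hj : j < x.length) :
    (pvAfold ((pvPos x PySem.Chars.isupper).zip
        (pvPos x PySem.Chars.islower)) x).getD j 'A' = pvSpec x j := by
  have hndU := pv_idxList_nodup x PySem.Chars.isupper
  have hndL := pv_idxList_nodup x PySem.Chars.islower
  have hdisj : ∀ e ∈ pvPos x PySem.Chars.isupper, e ∉ pvPos x PySem.Chars.islower :=
    fun e he => pv_disjoint x e he
  set up := pvPos x PySem.Chars.isupper with hupdef
  set lo := pvPos x PySem.Chars.islower with hlodef
  have hnd := pv_idx_zip_nodup up lo hndU hndL hdisj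
  have hbd : ∀ e ∈ pvIdx (up.zip lo), ∃ k : Nat, e = (k : Int) ∧ k < x.length := by
    intro e he
    rcases pv_mem_idx_zip he with h | h
    · obtain ⟨k, h1, h2, _⟩ := pv_mem_idxList x _ e h
      exact ⟨k, h1, h2⟩
    · obtain ⟨k, h1, h2, _⟩ := pv_mem_idxList x _ e h
      exact ⟨k, h1, h2⟩
  have hmain := pv_main (up.zip lo) x PySem.Dict.empty hnd hbd
    (fun e _ => PySem.Dict.get?_empty e) (fun k _ => Or.inl (PySem.Dict.get?_empty _)) j hj
  rw [hmain]
  have hxgd : x.getD j 'A' = x[j] := List.getD_eq_getElem x 'A' hj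
  have hminN : min up.length lo.length = pvN x := by
    rw [hupdef, hlodef, pv_len_pos, pv_len_pos]; rfl
  rw [hxgd]
  unfold pvSpec
  rw [hxgd]
  by_cases hu : PySem.Chars.isupper x[j] = true
  · have hposu := pv_pos_getElem x PySem.Chars.isupper j hj hu
    have hcu_lt : pvCnt x PySem.Chars.isupper j < up.length := (List.getElem?_eq_some_iff.mp hposu).1
    have hupj : up[pvCnt x PySem.Chars.isupper j] = ((j : Nat) : Int) :=
      (List.getElem?_eq_some_iff.mp hposu).2
    by_cases hlt : pvCnt x PySem.Chars.isupper j < pvN x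
    · have hkz : pvCnt x PySem.Chars.isupper j < (up.zip lo).length := by
        rw [List.length_zip]; omega
      have hklo : pvCnt x PySem.Chars.isupper j < lo.length := by
        rw [List.length_zip] at hkz; omega
      have hpmem : (up.zip lo)[pvCnt x PySem.Chars.isupper j] ∈ up.zip lo := List.getElem_mem hkz
      have hpe : (up.zip lo)[pvCnt x PySem.Chars.isupper j] =
          (up[pvCnt x PySem.Chars.isupper j], lo[pvCnt x PySem.Chars.isupper j]) :=
        List.getElem_zip
      have hfst := pv_Bdict_get?_fst _ x PySem.Dict.empty _ hnd hpmem
      rw [hpe] at hfst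
      dsimp only at hfst
      rw [hupj] at hfst
      rw [hfst]
      obtain ⟨j', hj', hpos', hchr'⟩ := pv_pair_at x PySem.Chars.islower _ hklo
      have hlok : lo[pvCnt x PySem.Chars.isupper j] = ((j' : Nat) : Int) :=
        (List.getElem?_eq_some_iff.mp hpos').2
      rw [hlok]
      have hgd' : PySem.List.pyGetD x ((j' : Nat) : Int) 'A' = x[j'] := by
        rw [PySem.List.pyGetD_natCast]; exact List.getD_eq_getElem x 'A' hj'
      rw [hgd', if_pos (by simp [hu, hlt])]
      have : (x.filter PySem.Chars.islower).getD (pvCnt x PySem.Chars.isupper j) 'A' = x[j'] := by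
        rw [List.getD_eq_getElem?_getD, hchr']
        rfl
      rw [this]
      rfl
    · have hnotmem : ((j : Nat) : Int) ∉ pvIdx (up.zip lo) := by
        intro hmem
        obtain ⟨k', hk', hcase⟩ := pv_mem_idx_zip_getElem hmem
        rcases hcase with hc | hc
        · have hup2 : up[k']'(by omega) = up[pvCnt x PySem.Chars.isupper j]'hcu_lt := by
            rw [hc, hupj]
          have hkk := (List.Nodup.getElem_inj_iff hndU).mp hup2
          omega
        · have hjup : ((j : Nat) : Int) ∈ up := by rw [← hupj]; exact List.getElem_mem hcu_lt
          have hjlo : ((j : Nat) : Int) ∈ lo := by rw [← hc]; exact List.getElem_mem _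
          exact hdisj _ hjup hjlo
      have hget : (pvBdict (up.zip lo) x PySem.Dict.empty).get? ((j : Nat) : Int) = none := by
        rw [pv_Bdict_get?_of_not_mem _ _ _ _ hnotmem]
        exact PySem.Dict.get?_empty _
      rw [hget, if_neg (by simp [hlt]), if_neg (by simp [pv_upper_not_lower _ hu])]
      rfl
  · have hu' : PySem.Chars.isupper x[j] = false := by
      cases h : PySem.Chars.isupper x[j] <;> simp_all
    by_cases hl : PySem.Chars.islower x[j] = true
    · have hposl := pv_pos_getElem x PySem.Chars.islower j hj hl
      have hcl_lt : pvCnt x PySem.Chars.islower j < lo.length := (List.getElem?_eq_some_iff.mp hposl).1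
      have hloj : lo[pvCnt x PySem.Chars.islower j] = ((j : Nat) : Int) :=
        (List.getElem?_eq_some_iff.mp hposl).2
      by_cases hlt : pvCnt x PySem.Chars.islower j < pvN x
      · have hkz : pvCnt x PySem.Chars.islower j < (up.zip lo).length := by
          rw [List.length_zip]; omega
        have hkup : pvCnt x PySem.Chars.islower j < up.length := by
          rw [List.length_zip] at hkz; omega
        have hpmem : (up.zip lo)[pvCnt x PySem.Chars.islower j] ∈ up.zip lo := List.getElem_mem hkz
        have hpe : (up.zip lo)[pvCnt x PySem.Chars.islower j] =
            (up[pvCnt x PySem.Chars.islower j], lo[pvCnt x PySem.Chars.islower j]) :=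
          List.getElem_zip
        have hsnd := pv_Bdict_get?_snd _ x PySem.Dict.empty _ hnd hpmem
        rw [hpe] at hsnd
        dsimp only at hsnd
        rw [hloj] at hsnd
        rw [hsnd]
        obtain ⟨j', hj', hpos', hchr'⟩ := pv_pair_at x PySem.Chars.isupper _ hkup
        have hupk : up[pvCnt x PySem.Chars.islower j] = ((j' : Nat) : Int) :=
          (List.getElem?_eq_some_iff.mp hpos').2
        rw [hupk]
        have hgd' : PySem.List.pyGetD x ((j' : Nat) : Int) 'A' = x[j'] := by
          rw [PySem.List.pyGetD_natCast]; exact List.getD_eq_getElem x 'A' hj'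
        rw [hgd', if_neg (by simp [hu']), if_pos (by simp [hl, hlt])]
        have : (x.filter PySem.Chars.isupper).getD (pvCnt x PySem.Chars.islower j) 'A' = x[j'] := by
          rw [List.getD_eq_getElem?_getD, hchr']
          rfl
        rw [this]
        rfl
      · have hnotmem : ((j : Nat) : Int) ∉ pvIdx (up.zip lo) := by
          intro hmem
          obtain ⟨k', hk', hcase⟩ := pv_mem_idx_zip_getElem hmem
          rcases hcase with hc | hc
          · have hjup : ((j : Nat) : Int) ∈ up := by rw [← hc]; exact List.getElem_mem _
            have hjlo : ((j : Nat) : Int) ∈ lo := by rw [← hloj]; exact List.getElem_mem hcl_lt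
            exact hdisj _ hjup hjlo
          · have hlo2 : lo[k']'(by omega) = lo[pvCnt x PySem.Chars.islower j]'hcl_lt := by
              rw [hc, hloj]
            have hkk := (List.Nodup.getElem_inj_iff hndL).mp hlo2
            omega
        have hget : (pvBdict (up.zip lo) x PySem.Dict.empty).get? ((j : Nat) : Int) = none := by
          rw [pv_Bdict_get?_of_not_mem _ _ _ _ hnotmem]
          exact PySem.Dict.get?_empty _
        rw [hget, if_neg (by simp [hu']), if_neg (by simp [hlt])]
        rfl
    · have hl' : PySem.Chars.islower x[j] = false := by
        cases h : PySem.Chars.islower x[j] <;> simp_all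
      have hnotmem : ((j : Nat) : Int) ∉ pvIdx (up.zip lo) := by
        intro hmem
        rcases pv_mem_idx_zip hmem with h | h
        · obtain ⟨k, hk1, hk2, hP⟩ := pv_mem_idxList x _ _ h
          have : j = k := by exact_mod_cast hk1
          subst this
          rw [hu'] at hP
          exact Bool.false_ne_true hP
        · obtain ⟨k, hk1, hk2, hP⟩ := pv_mem_idxList x _ _ h
          have : j = k := by exact_mod_cast hk1
          subst this
          rw [hl'] at hP
          exact Bool.false_ne_true hP
      have hget : (pvBdict (up.zip lo) x PySem.Dict.empty).get? ((j : Nat) : Int) = none := by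
        rw [pv_Bdict_get?_of_not_mem _ _ _ _ hnotmem]
        exact PySem.Dict.get?_empty _
      rw [hget, if_neg (by simp [hu']), if_neg (by simp [hl'])]
      rfl

-- B's fold is pvBrec
lemma pv_fold_brec (U L : List Char) (n : Nat) :
    ∀ (t : List Char) (out : List Char) (cu cl : Nat),
    (t.foldl (fun (st : List Char × Nat × Nat) c =>
      if PySem.Chars.isupper c && decide (st.2.1 < n) then
        (st.1 ++ [L.getD st.2.1 'A'], st.2.1 + 1, st.2.2)
      else if PySem.Chars.islower c && decide (st.2.2 < n) then
        (st.1 ++ [U.getD st.2.2 'A'], st.2.1, st.2.2 + 1)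
      else
        (st.1 ++ [c], st.2.1, st.2.2)) (out, cu, cl)).1 = out ++ pvBrec U L n t cu cl := by
  intro t
  induction t with
  | nil => intro out cu cl; simp [pvBrec]
  | cons c t ih =>
    intro out cu cl
    rw [List.foldl_cons]
    by_cases h1 : (PySem.Chars.isupper c && decide (cu < n)) = true
    · simp only [h1, if_pos]
      rw [ih]
      simp [pvBrec, h1, List.append_assoc]
    · rw [if_neg (by simp [h1])]
      by_cases h2 : (PySem.Chars.islower c && decide (cl < n)) = true
      · simp only [h2, if_pos]
        rw [ih]
        simp [pvBrec, h1, h2, List.append_assoc]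
      · rw [if_neg (by simp [h2]), ih]
        simp [pvBrec, h1, h2, List.append_assoc]

lemma pv_cnt_succ (x : List Char) (P : Char → Bool) (j : Nat) (hj : j < x.length) :
    pvCnt x P (j + 1) = pvCnt x P j + (if P (x[j]) then 1 else 0) := by
  unfold pvCnt
  rw [List.take_add_one, List.countP_append, List.getElem?_eq_getElem hj]
  simp [List.countP_cons]

-- B's scan emits pvSpec at every position
lemma pv_brec_spec (x : List Char) :
    ∀ (m j : Nat), m = x.length - j → j ≤ x.length →
    pvBrec (x.filter PySem.Chars.isupper) (x.filter PySem.Chars.islower)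
        (pvN x) (x.drop j)
        (min (pvCnt x PySem.Chars.isupper j) (pvN x))
        (min (pvCnt x PySem.Chars.islower j) (pvN x))
      = (List.range' j (x.length - j)).map (pvSpec x) := by
  intro m
  induction m with
  | zero =>
    intro j hm hj
    have hje : j = x.length := by omega
    subst hje
    rw [List.drop_length, ← hm]
    simp [pvBrec]
  | succ m ihm =>
    intro j hm hj
    have hjlt : j < x.length := by omega
    have hrange : x.length - j = m + 1 := by omega
    rw [List.drop_eq_getElem_cons hjlt, hrange, List.range'_succ, List.map_cons]
    have hgd : x.getD j 'A' = x[j] := List.getD_eq_getElem x 'A' hjlt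
    have hcu := pv_cnt_succ x PySem.Chars.isupper j hjlt
    have hcl := pv_cnt_succ x PySem.Chars.islower j hjlt
    have hm' : m = x.length - (j + 1) := by omega
    simp only [pvBrec]
    by_cases hu : PySem.Chars.isupper x[j] = true
    · have hnl : PySem.Chars.islower x[j] = false := pv_upper_not_lower _ hu
      have hcu' : pvCnt x PySem.Chars.isupper (j + 1) =
          pvCnt x PySem.Chars.isupper j + 1 := by rw [hcu]; simp [hu]
      have hcl' : pvCnt x PySem.Chars.islower (j + 1) =
          pvCnt x PySem.Chars.islower j := by rw [hcl]; simp [hnl]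
      by_cases hlt : pvCnt x PySem.Chars.isupper j < pvN x
      · rw [if_pos (by simp [hu]; omega)]
        have hspec : pvSpec x j = (x.filter PySem.Chars.islower).getD
            (pvCnt x PySem.Chars.isupper j) 'A' := by
          unfold pvSpec
          rw [hgd, if_pos (by simp [hu, hlt])]
        rw [hspec]
        have h1 : min (pvCnt x PySem.Chars.isupper j) (pvN x) =
            pvCnt x PySem.Chars.isupper j := by omega
        have h2 : pvCnt x PySem.Chars.isupper j + 1 =
            min (pvCnt x PySem.Chars.isupper (j + 1)) (pvN x) := by
          rw [hcu']; omega
        rw [h1, h2, ← hcl']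
        rw [show m = x.length - (j + 1) from hm']
        exact congrArg (List.cons _) (ihm (j + 1) hm' (by omega))
      · rw [if_neg (by simp [hu]; omega), if_neg (by simp [hnl])]
        have hspec : pvSpec x j = x[j] := by
          unfold pvSpec
          rw [hgd, if_neg (by simp [hu]; omega), if_neg (by simp [hnl])]
        rw [hspec]
        have h2 : min (pvCnt x PySem.Chars.isupper j) (pvN x) =
            min (pvCnt x PySem.Chars.isupper (j + 1)) (pvN x) := by
          rw [hcu']; omega
        rw [h2, ← hcl']
        rw [show m = x.length - (j + 1) from hm']
        exact congrArg (List.cons _) (ihm (j + 1) hm' (by omega))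
    · have hu' : PySem.Chars.isupper x[j] = false := by
        cases h : PySem.Chars.isupper x[j] <;> simp_all
      have hcu' : pvCnt x PySem.Chars.isupper (j + 1) =
          pvCnt x PySem.Chars.isupper j := by rw [hcu]; simp [hu']
      rw [if_neg (by simp [hu'])]
      by_cases hl : PySem.Chars.islower x[j] = true
      · have hcl' : pvCnt x PySem.Chars.islower (j + 1) =
            pvCnt x PySem.Chars.islower j + 1 := by rw [hcl]; simp [hl]
        by_cases hlt : pvCnt x PySem.Chars.islower j < pvN x
        · rw [if_pos (by simp [hl]; omega)]
          have hspec : pvSpec x j = (x.filter PySem.Chars.isupper).getD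
              (pvCnt x PySem.Chars.islower j) 'A' := by
            unfold pvSpec
            rw [hgd, if_neg (by simp [hu']), if_pos (by simp [hl, hlt])]
          rw [hspec]
          have h1 : min (pvCnt x PySem.Chars.islower j) (pvN x) =
              pvCnt x PySem.Chars.islower j := by omega
          have h2 : pvCnt x PySem.Chars.islower j + 1 =
              min (pvCnt x PySem.Chars.islower (j + 1)) (pvN x) := by
            rw [hcl']; omega
          rw [h1, h2, ← hcu']
          rw [show m = x.length - (j + 1) from hm']
          exact congrArg (List.cons _) (ihm (j + 1) hm' (by omega))
        · rw [if_neg (by simp [hl]; omega)]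
          have hspec : pvSpec x j = x[j] := by
            unfold pvSpec
            rw [hgd, if_neg (by simp [hu']), if_neg (by simp [hl]; omega)]
          rw [hspec]
          have h2 : min (pvCnt x PySem.Chars.islower j) (pvN x) =
              min (pvCnt x PySem.Chars.islower (j + 1)) (pvN x) := by
            rw [hcl']; omega
          rw [h2, ← hcu']
          rw [show m = x.length - (j + 1) from hm']
          exact congrArg (List.cons _) (ihm (j + 1) hm' (by omega))
      · have hl' : PySem.Chars.islower x[j] = false := by
          cases h : PySem.Chars.islower x[j] <;> simp_all
        have hcl' : pvCnt x PySem.Chars.islower (j + 1) =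
            pvCnt x PySem.Chars.islower j := by rw [hcl]; simp [hl']
        rw [if_neg (by simp [hl'])]
        have hspec : pvSpec x j = x[j] := by
          unfold pvSpec
          rw [hgd, if_neg (by simp [hu']), if_neg (by simp [hl'])]
        rw [hspec, ← hcu', ← hcl']
        rw [show m = x.length - (j + 1) from hm']
        exact congrArg (List.cons _) (ihm (j + 1) hm' (by omega))

-- ===== VERDICT (by name: the statement is the Claim_ definition above) =====
theorem swap_case_pos_spec : Claim_equal_swap_case_pos := by
  intro s _
  unfold Spec_swap_case_pos swap_case_pos swap_case_pos_alt
  dsimp only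
  set x := s.toList with hx
  set up := ((PySem.List.enumerate x).filter (fun ic => PySem.Chars.isupper ic.2)).map (·.1) with hup
  set lo := ((PySem.List.enumerate x).filter (fun ic => PySem.Chars.islower ic.2)).map (·.1) with hlo
  have hup' : up = pvPos x PySem.Chars.isupper := rfl
  have hlo' : lo = pvPos x PySem.Chars.islower := rfl
  have hA : (PySem.List.pyRange 0 ((min up.length lo.length : Nat) : Int) 1).foldl (fun a i =>
      let u := PySem.List.pyGetD up i (0 : Int)
      let l := PySem.List.pyGetD lo i (0 : Int)
      PySem.List.pySetD (PySem.List.pySetD a u (PySem.List.pyGetD a l 'A')) l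
        (PySem.List.pyGetD a u 'A')) x = pvAfold (up.zip lo) x := by
    rw [PySem.List.pyRange_zero_natCast, List.foldl_map]
    simp only [PySem.List.pyGetD_natCast]
    exact pv_foldl_range_zip
      (fun a p => PySem.List.pySetD (PySem.List.pySetD a p.1 (PySem.List.pyGetD a p.2 'A')) p.2
        (PySem.List.pyGetD a p.1 'A')) up lo x
  rw [hA]
  set U := x.filter (fun c => PySem.Chars.isupper c) with hU
  set L := x.filter (fun c => PySem.Chars.islower c) with hL
  rw [pv_fold_brec U L (min U.length L.length) x [] 0 0, List.nil_append]
  have h00 : pvBrec U L (min U.length L.length) x 0 0 = (List.range' 0 x.length).map (pvSpec x) := by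
    have h := pv_brec_spec x x.length 0 (by omega) (by omega)
    rw [List.drop_zero, Nat.sub_zero] at h
    have hc0u : min (pvCnt x PySem.Chars.isupper 0) (pvN x) = 0 := by
      simp [pvCnt]
    have hc0l : min (pvCnt x PySem.Chars.islower 0) (pvN x) = 0 := by
      simp [pvCnt]
    rw [hc0u, hc0l] at h
    exact h
  rw [h00]
  refine congrArg String.mk ?_
  apply List.ext_getElem
  · rw [pv_Afold_length, List.length_map, List.length_range']
  · intro j hj1 hj2
    have hjx : j < x.length := by rwa [pv_Afold_length] at hj1
    have h1 : (pvAfold (up.zip lo) x)[j] = (pvAfold (up.zip lo) x).getD j 'A' :=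
      (List.getD_eq_getElem _ 'A' hj1).symm
    rw [h1, hup', hlo', pv_A_elem x j hjx]
    rw [List.getElem_map, List.getElem_range']
    simp
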